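-- pv_equiv track=rewrite | github.com/Lucja-Doradzinska/ff_prep_scripts | ff_lab_mn.py | get_stim_conditions
-- ===== SOURCE A (Python) =====
-- from collections import OrderedDict
--
-- def get_stim_conditions(beh_stim_coding, new_conditions):
--
--     stim_conditions = OrderedDict()
--     stim_conditions[''] = {}
--     stim_cond_holder = OrderedDict()
--     for factor in beh_stim_coding:
--         for label in stim_conditions:
--             for cond in beh_stim_coding[factor]:
--                 if label == '':
--                     new_label = beh_stim_coding[factor][cond]
--                 else:
--                     new_label = label + '_' + beh_stim_coding[factor][cond]
--                 stim_cond_holder[new_label] = stim_conditions[label].copy()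
--                 stim_cond_holder[new_label][factor] = cond
--         stim_conditions = stim_cond_holder
--         stim_cond_holder = OrderedDict()
--     for label in stim_conditions:
--         for contr in new_conditions:
--             for cond in new_conditions[contr]:
--                 for case in new_conditions[contr][cond]:
--                     if all([case[cond] == stim_conditions[label][cond] for cond in case]):
--                         stim_conditions[label][contr] = cond
--     return stim_conditions
-- ===== SOURCE B (Python) =====
-- # B: builds the label/condition product by structural recursion over the factor list
-- # (instead of A's accumulator-growing holder-dict loop) and annotates contrasts with
-- # the outer two loops swapped (contrast outer, label inner), which is order-independent.
-- from collections import OrderedDict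
--
--
-- def get_stim_conditions(beh_stim_coding, new_conditions):
--     factors = list(beh_stim_coding)
--
--     def build(k):
--         # combinations over the first k factors, as OrderedDict label -> {factor: cond}
--         if k == 0:
--             return OrderedDict({'': {}})
--         prev = build(k - 1)
--         factor = factors[k - 1]
--         out = OrderedDict()
--         for label, chosen in prev.items():
--             for cond, value in beh_stim_coding[factor].items():
--                 new_label = value if label == '' else label + '_' + value
--                 out[new_label] = {**chosen, factor: cond}
--         return out
--
--     stim_conditions = build(len(factors))
--     for contr, conds in new_conditions.items():
--         for label, chosen in stim_conditions.items():
--             for cond, cases in conds.items():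
--                 for case in cases:
--                     if all([case[k] == chosen[k] for k in case]):
--                         chosen[contr] = cond
--     return stim_conditions
-- ===== Notes on version B (the rewrite author's own statement) =====
-- stated objective: alternative
-- what changed: Phase 1 builds the label/condition product by structural recursion over the factor list (fresh dict per level) instead of A's accumulator loop that swaps a growing holder OrderedDict, and phase 2 annotates with the two outer loops swapped (contrast outer, label inner), relying on the per-label independence of the annotation.
import Mathlib
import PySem

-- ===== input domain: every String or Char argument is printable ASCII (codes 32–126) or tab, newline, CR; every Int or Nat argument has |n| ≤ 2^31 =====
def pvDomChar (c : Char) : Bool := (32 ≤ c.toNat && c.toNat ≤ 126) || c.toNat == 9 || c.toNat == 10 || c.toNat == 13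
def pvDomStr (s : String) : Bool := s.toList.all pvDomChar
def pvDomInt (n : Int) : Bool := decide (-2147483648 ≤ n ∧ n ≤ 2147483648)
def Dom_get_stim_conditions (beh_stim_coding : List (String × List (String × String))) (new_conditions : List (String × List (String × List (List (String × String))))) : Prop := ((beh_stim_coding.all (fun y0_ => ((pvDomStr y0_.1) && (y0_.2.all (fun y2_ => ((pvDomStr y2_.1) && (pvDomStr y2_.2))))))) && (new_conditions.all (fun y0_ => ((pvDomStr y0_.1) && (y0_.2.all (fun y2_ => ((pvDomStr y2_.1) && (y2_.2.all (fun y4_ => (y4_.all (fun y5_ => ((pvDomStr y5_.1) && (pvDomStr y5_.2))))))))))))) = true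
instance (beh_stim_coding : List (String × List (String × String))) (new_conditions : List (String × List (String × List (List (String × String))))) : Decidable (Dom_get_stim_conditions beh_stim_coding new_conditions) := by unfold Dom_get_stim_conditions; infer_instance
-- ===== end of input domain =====

-- B builds the condition product by structural recursion over the factor list and annotates
-- contrasts with the outer two loops swapped (contrast outer, label inner); same cost as A.

-- ===== PORT A =====
-- 'for label in stim_conditions' + 'stim_conditions[label]' iterates the dict's items in
-- insertion order; the two holder assignments combine into one insert of the updated copy.
def pvStageA (stim : PySem.Dict String (PySem.Dict String String))
    (fp : String × List (String × String)) : PySem.Dict String (PySem.Dict String String) :=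
  stim.items.foldl
    (fun holder lp =>
      fp.2.foldl
        (fun holder cp =>
          holder.insert (if lp.1 == "" then cp.2 else lp.1 ++ "_" ++ cp.2)
            (lp.2.insert fp.1 cp.1))
        holder)
    PySem.Dict.empty

-- the second loop: 'stim_conditions[label][contr] = cond' is an insert of the updated inner
-- dict; the d[k] lookups that would raise KeyError are modeled with getD (Pre_ excludes them)
def get_stim_conditions (beh_stim_coding : List (String × List (String × String))) (new_conditions : List (String × List (String × List (List (String × String))))) : List (String × List (String × String)) :=
  let stim0 : PySem.Dict String (PySem.Dict String String) :=
    PySem.Dict.empty.insert "" PySem.Dict.empty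
  let stim1 := beh_stim_coding.foldl pvStageA stim0
  let stim2 := stim1.keys.foldl
    (fun st label =>
      new_conditions.foldl
        (fun st contrp =>
          contrp.2.foldl
            (fun st condp =>
              condp.2.foldl
                (fun st case_ =>
                  if case_.all (fun kv => kv.2 == (st.getD label PySem.Dict.empty).getD kv.1 "")
                  then st.insert label ((st.getD label PySem.Dict.empty).insert contrp.1 condp.1)
                  else st)
                st)
            st)
        st)
    stim1
  stim2.items.map (fun p => (p.1, p.2.items))

-- ===== PORT B =====
-- build(k) of Source B: the product over the first k factors, by recursion on k
def pvBuildB (beh_stim_coding : List (String × List (String × String))) :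
    Nat → PySem.Dict String (PySem.Dict String String)
  | 0 => PySem.Dict.empty.insert "" PySem.Dict.empty
  | k + 1 =>
    let prev := pvBuildB beh_stim_coding k
    let fp := beh_stim_coding.getD k ("", [])
    prev.items.foldl
      (fun out lp =>
        fp.2.foldl
          (fun out cp =>
            out.insert (if lp.1 == "" then cp.2 else lp.1 ++ "_" ++ cp.2)
              (lp.2.insert fp.1 cp.1))
          out)
      PySem.Dict.empty

-- one contrast annotated into one label's dict ('chosen[contr] = cond' = insert)
def pvAnnotB (contr : String) (conds : List (String × List (List (String × String))))
    (st : PySem.Dict String (PySem.Dict String String)) (label : String) :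
    PySem.Dict String (PySem.Dict String String) :=
  conds.foldl
    (fun st condp =>
      condp.2.foldl
        (fun st case_ =>
          if case_.all (fun kv => kv.2 == (st.getD label PySem.Dict.empty).getD kv.1 "")
          then st.insert label ((st.getD label PySem.Dict.empty).insert contr condp.1)
          else st)
        st)
    st

def get_stim_conditions_alt (beh_stim_coding : List (String × List (String × String))) (new_conditions : List (String × List (String × List (List (String × String))))) : List (String × List (String × String)) :=
  let stim := pvBuildB beh_stim_coding beh_stim_coding.length
  let stim2 := new_conditions.foldl
    (fun st contrp => st.keys.foldl (fun st label => pvAnnotB contrp.1 contrp.2 st label) st)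
    stim
  stim2.items.map (fun p => (p.1, p.2.items))

-- ===== PRECONDITION & SPEC =====
-- static key-availability check for phase 2: processing the contrasts in order with G the
-- set of keys guaranteed present in every label's dict (initially the factor keys), every
-- case key must lie in G; a contrast that surely fires on every label (one of its conds has
-- the empty case, which matches everything) adds its own key to G for later contrasts
def pvKeysOk : List String → List (String × List (String × List (List (String × String)))) → Bool
  | _, [] => true
  | G, cp :: rest =>
    (cp.2.all (fun q => q.2.all (fun case_ => case_.all (fun kv => G.contains kv.1)))) &&
    pvKeysOk (if cp.2.any (fun q => q.2.contains ([] : List (String × String))) then cp.1 :: G else G) rest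

-- Pre_ excludes the inputs on which A's phase-2 lookup stim_conditions[label][cond] can raise
-- KeyError: unless some factor has no conditions (then no labels exist and phase 2 is a
-- no-op), every contrast-case key must be statically guaranteed present — a factor key, or
-- an earlier contrast that certainly annotated every label via an empty case. This is
-- conservative: a case key referencing an earlier contrast whose annotation merely happened
-- to fire is also excluded although A returns there (B returns the same value; see cites).
def Pre_get_stim_conditions (beh_stim_coding : List (String × List (String × String))) (new_conditions : List (String × List (String × List (List (String × String))))) : Prop :=
  (∃ p ∈ beh_stim_coding, p.2 = []) ∨
  pvKeysOk (beh_stim_coding.map Prod.fst) new_conditions = true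

instance (beh_stim_coding : List (String × List (String × String))) (new_conditions : List (String × List (String × List (List (String × String))))) : Decidable (Pre_get_stim_conditions beh_stim_coding new_conditions) := by
  unfold Pre_get_stim_conditions; infer_instance

def pvWitness_get_stim_conditions : (List (String × List (String × String))) × (List (String × List (String × List (List (String × String))))) :=
  ([("f", [("a", "A")])], [("c", [("x", [[("f", "a")]])]), ("d", [("y", [[]])]), ("e", [("z", [[("d", "y")]])])])

def Spec_get_stim_conditions (beh_stim_coding : List (String × List (String × String))) (new_conditions : List (String × List (String × List (List (String × String))))) (out : List (String × List (String × String))) : Prop :=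
  out = get_stim_conditions_alt beh_stim_coding new_conditions

instance (beh_stim_coding : List (String × List (String × String))) (new_conditions : List (String × List (String × List (List (String × String))))) (out : List (String × List (String × String))) : Decidable (Spec_get_stim_conditions beh_stim_coding new_conditions out) := by
  unfold Spec_get_stim_conditions; infer_instance

-- ===== CLAIM =====
def Claim_equal_get_stim_conditions : Prop := ∀ (beh_stim_coding : List (String × List (String × String))) (new_conditions : List (String × List (String × List (List (String × String))))), Dom_get_stim_conditions beh_stim_coding new_conditions → Pre_get_stim_conditions beh_stim_coding new_conditions → Spec_get_stim_conditions beh_stim_coding new_conditions (get_stim_conditions beh_stim_coding new_conditions)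

-- ===== LEMMAS AND PROOFS =====

-- the pure per-label annotation: what phase 2 does to one label's dict, as a function
def pvAnnot1 (cp : String × List (String × List (List (String × String))))
    (d : PySem.Dict String String) : PySem.Dict String String :=
  cp.2.foldl
    (fun d condp =>
      condp.2.foldl
        (fun d case_ =>
          if case_.all (fun kv => kv.2 == d.getD kv.1 "") then d.insert cp.1 condp.1 else d)
        d)
    d

def pvAnnot (nc : List (String × List (String × List (List (String × String)))))
    (d : PySem.Dict String String) : PySem.Dict String String :=
  nc.foldl (fun d cp => pvAnnot1 cp d) d

-- apply f to the entry at `label`, leaving everything else in place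
def pvEMap (label : String) (f : PySem.Dict String String → PySem.Dict String String)
    (st : PySem.Dict String (PySem.Dict String String)) :
    PySem.Dict String (PySem.Dict String String) :=
  PySem.Dict.mk (st.items.map (fun p => if p.1 == label then (p.1, f p.2) else p))

theorem pvEMap_keys (label : String) (f : PySem.Dict String String → PySem.Dict String String)
    (st : PySem.Dict String (PySem.Dict String String)) :
    (pvEMap label f st).keys = st.keys := by
  show List.map _ (List.map _ st.items) = List.map _ st.items
  rw [List.map_map]
  apply List.map_congr_left
  intro p _
  by_cases h : p.1 = label <;> simp [h]

theorem pvEMap_comp (label : String)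
    (f g : PySem.Dict String String → PySem.Dict String String)
    (st : PySem.Dict String (PySem.Dict String String)) :
    pvEMap label g (pvEMap label f st) = pvEMap label (fun d => g (f d)) st := by
  apply PySem.Dict.ext
  show List.map _ (List.map _ st.items) = List.map _ st.items
  rw [List.map_map]
  apply List.map_congr_left
  intro p _
  by_cases h : p.1 = label <;> simp [h]

theorem pvEMap_id (label : String) (st : PySem.Dict String (PySem.Dict String String)) :
    pvEMap label (fun d => d) st = st := by
  apply PySem.Dict.ext
  show List.map _ st.items = st.items
  rw [List.map_congr_left (g := id), List.map_id]
  intro p _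
  by_cases h : p.1 = label
  · subst h; simp
  · simp [h]

-- one phase-2 update guarded by a test of the current value at `label` is an entry map
theorem pv_step (label : String) (P : PySem.Dict String String → Bool)
    (g : PySem.Dict String String → PySem.Dict String String)
    (st : PySem.Dict String (PySem.Dict String String))
    (hnd : st.keys.Nodup) (hm : label ∈ st.keys) :
    (if P (st.getD label PySem.Dict.empty)
     then st.insert label (g (st.getD label PySem.Dict.empty)) else st)
      = pvEMap label (fun d => if P d then g d else d) st := by
  have hc : st.contains label = true := (PySem.Dict.contains_iff_mem_keys _ _).2 hm
  have hval : ∀ q ∈ st.items, q.1 = label → st.getD label PySem.Dict.empty = q.2 := by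
    intro q hq hql
    have : (label, q.2) ∈ st.items := by rw [← hql]; exact hq
    exact PySem.Dict.getD_of_mem_items _ this hnd _
  by_cases hP : P (st.getD label PySem.Dict.empty)
  · rw [if_pos hP]
    apply PySem.Dict.ext
    rw [PySem.Dict.items_insert_of_contains _ _ hc]
    show List.map _ st.items = List.map _ st.items
    apply List.map_congr_left
    intro q hq
    by_cases h : q.1 = label
    · have hv := hval q hq h
      have hP' : P q.2 = true := by rw [← hv]; exact hP
      simp [h, hv, hP']
    · simp [h]
  · rw [if_neg hP]
    apply PySem.Dict.ext
    show st.items = List.map _ st.items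
    symm
    rw [List.map_congr_left (g := id), List.map_id]
    intro q hq
    by_cases h : q.1 = label
    · have hv := hval q hq h
      have hP' : ¬ P q.2 = true := by rw [← hv]; exact hP
      subst h
      simp [hP']
    · simp [h]

-- a fold of per-label steps at a fixed label is the entry map of the folded pure steps
theorem pv_liftFold {α : Type} (label : String) (l : List α)
    (step : PySem.Dict String (PySem.Dict String String) → α → PySem.Dict String (PySem.Dict String String))
    (F : α → PySem.Dict String String → PySem.Dict String String)
    (hstep : ∀ x st, st.keys.Nodup → label ∈ st.keys → step st x = pvEMap label (F x) st) :
    ∀ st : PySem.Dict String (PySem.Dict String String), st.keys.Nodup → label ∈ st.keys →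
      l.foldl step st = pvEMap label (fun d => l.foldl (fun d x => F x d) d) st := by
  induction l with
  | nil =>
    intro st hnd hm
    simp only [List.foldl_nil]
    exact (pvEMap_id label st).symm
  | cons x xs ih =>
    intro st hnd hm
    rw [List.foldl_cons, hstep x st hnd hm,
      ih (pvEMap label (F x) st) (by rw [pvEMap_keys]; exact hnd) (by rw [pvEMap_keys]; exact hm),
      pvEMap_comp]
    rfl

theorem pv_label_case (label contr cond : String) (cases_ : List (List (String × String)))
    (st : PySem.Dict String (PySem.Dict String String))
    (hnd : st.keys.Nodup) (hm : label ∈ st.keys) :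
    cases_.foldl
      (fun st case_ =>
        if case_.all (fun kv => kv.2 == (st.getD label PySem.Dict.empty).getD kv.1 "")
        then st.insert label ((st.getD label PySem.Dict.empty).insert contr cond)
        else st)
      st
      = pvEMap label
          (fun d =>
            cases_.foldl
              (fun d case_ =>
                if case_.all (fun kv => kv.2 == d.getD kv.1 "") then d.insert contr cond else d)
              d)
          st :=
  pv_liftFold label cases_ _
    (fun case_ d => if case_.all (fun kv => kv.2 == d.getD kv.1 "") then d.insert contr cond else d)
    (fun case_ st hnd hm =>
      pv_step label (fun d => case_.all (fun kv => kv.2 == d.getD kv.1 ""))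
        (fun d => d.insert contr cond) st hnd hm)
    st hnd hm

theorem pv_label_contr (label : String)
    (cp : String × List (String × List (List (String × String))))
    (st : PySem.Dict String (PySem.Dict String String))
    (hnd : st.keys.Nodup) (hm : label ∈ st.keys) :
    cp.2.foldl
      (fun st condp =>
        condp.2.foldl
          (fun st case_ =>
            if case_.all (fun kv => kv.2 == (st.getD label PySem.Dict.empty).getD kv.1 "")
            then st.insert label ((st.getD label PySem.Dict.empty).insert cp.1 condp.1)
            else st)
          st)
      st
      = pvEMap label (pvAnnot1 cp) st :=
  pv_liftFold label cp.2 _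
    (fun condp d =>
      condp.2.foldl
        (fun d case_ =>
          if case_.all (fun kv => kv.2 == d.getD kv.1 "") then d.insert cp.1 condp.1 else d)
        d)
    (fun condp st hnd hm => pv_label_case label cp.1 condp.1 condp.2 st hnd hm)
    st hnd hm

theorem pv_label_full (label : String)
    (nc : List (String × List (String × List (List (String × String)))))
    (st : PySem.Dict String (PySem.Dict String String))
    (hnd : st.keys.Nodup) (hm : label ∈ st.keys) :
    nc.foldl
      (fun st contrp =>
        contrp.2.foldl
          (fun st condp =>
            condp.2.foldl
              (fun st case_ =>
                if case_.all (fun kv => kv.2 == (st.getD label PySem.Dict.empty).getD kv.1 "")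
                then st.insert label ((st.getD label PySem.Dict.empty).insert contrp.1 condp.1)
                else st)
              st)
          st)
      st
      = pvEMap label (pvAnnot nc) st :=
  pv_liftFold label nc _ (fun cp d => pvAnnot1 cp d)
    (fun cp st hnd hm => pv_label_contr label cp st hnd hm)
    st hnd hm

-- folding entry maps over a duplicate-free list of present labels maps the listed entries
theorem pv_labels_fold_items (F : PySem.Dict String String → PySem.Dict String String)
    (step : PySem.Dict String (PySem.Dict String String) → String → PySem.Dict String (PySem.Dict String String))
    (hstep : ∀ label st, st.keys.Nodup → label ∈ st.keys → step st label = pvEMap label F st) :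
    ∀ (L : List String) (st : PySem.Dict String (PySem.Dict String String)),
      st.keys.Nodup → L.Nodup → (∀ l ∈ L, l ∈ st.keys) →
      (L.foldl step st).items
        = st.items.map (fun p => if p.1 ∈ L then (p.1, F p.2) else p) := by
  intro L
  induction L with
  | nil =>
    intro st hnd _ _
    simp only [List.foldl_nil, List.not_mem_nil, if_false]
    symm
    rw [List.map_congr_left (g := id), List.map_id]
    intro p _; simp
  | cons l L ih =>
    intro st hnd hL hmem
    have hlnotL : l ∉ L := (List.nodup_cons.1 hL).1
    rw [List.foldl_cons, hstep l st hnd (hmem l (List.mem_cons_self ..))]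
    rw [ih (pvEMap l F st) (by rw [pvEMap_keys]; exact hnd) (List.nodup_cons.1 hL).2
        (by intro l' hl'; rw [pvEMap_keys]; exact hmem l' (List.mem_cons_of_mem _ hl'))]
    show List.map _ (List.map _ st.items) = _
    rw [List.map_map]
    apply List.map_congr_left
    intro p _
    by_cases h : p.1 = l
    · simp [h, hlnotL, List.mem_cons]
    · simp [h, List.mem_cons]

-- phase 2 of A: iterating all labels (keys of the product dict) annotates every entry
theorem pv_phase2A (nc : List (String × List (String × List (List (String × String)))))
    (st : PySem.Dict String (PySem.Dict String String)) (hnd : st.keys.Nodup) :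
    (st.keys.foldl
      (fun st label =>
        nc.foldl
          (fun st contrp =>
            contrp.2.foldl
              (fun st condp =>
                condp.2.foldl
                  (fun st case_ =>
                    if case_.all (fun kv => kv.2 == (st.getD label PySem.Dict.empty).getD kv.1 "")
                    then st.insert label ((st.getD label PySem.Dict.empty).insert contrp.1 condp.1)
                    else st)
                  st)
              st)
          st)
      st).items
      = st.items.map (fun p => (p.1, pvAnnot nc p.2)) := by
  rw [pv_labels_fold_items (pvAnnot nc) _
      (fun label st hnd hm => pv_label_full label nc st hnd hm) st.keys st hnd hnd
      (fun l hl => hl)]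
  apply List.map_congr_left
  intro p hp
  have : p.1 ∈ st.keys := List.mem_map_of_mem hp
  simp [this]

-- phase 2 of B: one contrast over all labels, then induction over the contrasts
theorem pv_phase2B (nc : List (String × List (String × List (List (String × String))))) :
    ∀ st : PySem.Dict String (PySem.Dict String String), st.keys.Nodup →
    (nc.foldl
      (fun st contrp => st.keys.foldl (fun st label => pvAnnotB contrp.1 contrp.2 st label) st)
      st).items
      = st.items.map (fun p => (p.1, pvAnnot nc p.2)) := by
  induction nc with
  | nil =>
    intro st hnd
    simp only [List.foldl_nil, pvAnnot]
    symm
    rw [List.map_congr_left (g := id), List.map_id]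
    intro p _; simp
  | cons cp rest ih =>
    intro st hnd
    rw [List.foldl_cons]
    have hone : (st.keys.foldl (fun st label => pvAnnotB cp.1 cp.2 st label) st).items
        = st.items.map (fun p => (p.1, pvAnnot1 cp p.2)) := by
      rw [pv_labels_fold_items (pvAnnot1 cp)
          (fun st label => pvAnnotB cp.1 cp.2 st label)
          (fun label st hnd hm => pv_label_contr label cp st hnd hm) st.keys st hnd hnd
          (fun l hl => hl)]
      apply List.map_congr_left
      intro p hp
      have : p.1 ∈ st.keys := List.mem_map_of_mem hp
      simp [this]
    have hkeys : (st.keys.foldl (fun st label => pvAnnotB cp.1 cp.2 st label) st).keys = st.keys := by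
      show List.map _ _ = _
      rw [hone, List.map_map]
      rfl
    rw [ih _ (by rw [hkeys]; exact hnd), hone, List.map_map]
    rfl

-- each product stage has duplicate-free keys (it is built from an empty dict by inserts)
theorem pv_stage_nodup (stim : PySem.Dict String (PySem.Dict String String))
    (fp : String × List (String × String)) : (pvStageA stim fp).keys.Nodup := by
  unfold pvStageA
  have H : ∀ (l : List (String × PySem.Dict String String))
      (holder : PySem.Dict String (PySem.Dict String String)), holder.keys.Nodup →
      (l.foldl
        (fun holder lp =>
          fp.2.foldl
            (fun holder cp =>
              holder.insert (if lp.1 == "" then cp.2 else lp.1 ++ "_" ++ cp.2)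
                (lp.2.insert fp.1 cp.1))
            holder)
        holder).keys.Nodup := by
    intro l
    induction l with
    | nil => intro holder h; exact h
    | cons lp l ih =>
      intro holder h
      rw [List.foldl_cons]
      exact ih _ (PySem.Dict.nodup_keys_foldl_insert_key fp.2
        (fun cp => if lp.1 == "" then cp.2 else lp.1 ++ "_" ++ cp.2)
        (fun _ cp => lp.2.insert fp.1 cp.1) holder h)
  exact H stim.items PySem.Dict.empty PySem.Dict.nodup_keys_empty

theorem pv_phase1_nodup (beh : List (String × List (String × String))) :
    ∀ st : PySem.Dict String (PySem.Dict String String), st.keys.Nodup →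
      (beh.foldl pvStageA st).keys.Nodup := by
  induction beh with
  | nil => intro st h; exact h
  | cons fp beh ih =>
    intro st h
    rw [List.foldl_cons]
    exact ih _ (pv_stage_nodup st fp)

-- phase 1: B's recursion over the first k factors is A's accumulator fold over them
theorem pv_phase1_eq (beh : List (String × List (String × String))) :
    ∀ k, k ≤ beh.length →
      pvBuildB beh k
        = (beh.take k).foldl pvStageA (PySem.Dict.empty.insert "" PySem.Dict.empty) := by
  intro k
  induction k with
  | zero => intro _; rfl
  | succ k ih =>
    intro hk
    have hk' : k < beh.length := hk
    have hget : beh.getD k ("", []) = beh[k] := by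
      rw [List.getD_eq_getElem?_getD, List.getElem?_eq_getElem hk']
      rfl
    have htake : beh.take (k + 1) = beh.take k ++ [beh[k]] := by
      rw [List.take_add_one, List.getElem?_eq_getElem hk']
      rfl
    rw [htake, List.foldl_append]
    show (pvBuildB beh k).items.foldl _ _ = _
    rw [ih (Nat.le_of_lt hk'), hget]
    rfl

-- ===== VERDICT (by name: the statement is the Claim_ definition above) =====
theorem get_stim_conditions_spec : Claim_equal_get_stim_conditions := by
  intro bsc nc _ _
  simp only [Spec_get_stim_conditions, get_stim_conditions, get_stim_conditions_alt]
  rw [pv_phase1_eq bsc bsc.length le_rfl, List.take_length]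
  have hnd : ((bsc.foldl pvStageA (PySem.Dict.empty.insert "" PySem.Dict.empty)).keys).Nodup :=
    pv_phase1_nodup bsc _
      (PySem.Dict.nodup_keys_insert PySem.Dict.empty "" PySem.Dict.empty
        PySem.Dict.nodup_keys_empty)
  congr 1
  rw [pv_phase2A nc _ hnd, pv_phase2B nc _ hnd]
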